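-- pv_equiv track=rewrite | github.com/ungood/brokin | app/lib/utils/keys.py | baseX_encode
-- ===== SOURCE A (Python) =====
-- BASE62_ALPHABET = "0123456789abcdefghijklmnopqrstuvwxyzABCDEFGHIJKLMNOPQRSTUVWXYZ"
--
-- def baseX_encode(num, chars=1, alphabet=BASE62_ALPHABET):
--     """Encode a number in Base X
--
--     See: http://stackoverflow.com/questions/1119722/base-62-conversion-in-python/1119769#1119769
--
--     Arguments:
--     num      -- The number to encode
--     chars    -- The minimum number of chars to encode (default 1)
--     alphabet -- The alphabet to use for encoding (default base62)
--     >>> baseX_encode(0)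
--     '0'
--     """
--     arr = []
--     base = len(alphabet)
--     while chars > 0:
--         num, rem = divmod(num, base)
--         arr.append(alphabet[rem])
--         chars -= 1
--
--     arr.reverse()
--     return ''.join(arr)
-- ===== SOURCE B (Python) =====
-- BASE62_ALPHABET = "0123456789abcdefghijklmnopqrstuvwxyzABCDEFGHIJKLMNOPQRSTUVWXYZ"
--
-- def baseX_encode(num, chars=1, alphabet=BASE62_ALPHABET):
--     """Encode the low `chars` base-X digits of num by divide and conquer:
--     split the width in half, encode the high half of the digits (taken from
--     num // base**lo) and the low half (from num itself) independently, and
--     concatenate; single-digit widths are the base case."""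
--     base = len(alphabet)
--
--     def enc(n, width):
--         if width <= 0:
--             return ''
--         if width == 1:
--             return alphabet[n % base]
--         lo = width // 2
--         return enc(n // base ** lo, width - lo) + enc(n, lo)
--
--     return enc(num, chars)
-- ===== Notes on version B (the rewrite author's own statement) =====
-- stated objective: alternative
-- what changed: B is a recursive divide-and-conquer: it splits the requested width in half, encodes the high half of the digits from num // base**lo and the low half from num independently, and concatenates, with a single-digit base case - no running quotient, no digit list, no reverse.
import Mathlib
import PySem

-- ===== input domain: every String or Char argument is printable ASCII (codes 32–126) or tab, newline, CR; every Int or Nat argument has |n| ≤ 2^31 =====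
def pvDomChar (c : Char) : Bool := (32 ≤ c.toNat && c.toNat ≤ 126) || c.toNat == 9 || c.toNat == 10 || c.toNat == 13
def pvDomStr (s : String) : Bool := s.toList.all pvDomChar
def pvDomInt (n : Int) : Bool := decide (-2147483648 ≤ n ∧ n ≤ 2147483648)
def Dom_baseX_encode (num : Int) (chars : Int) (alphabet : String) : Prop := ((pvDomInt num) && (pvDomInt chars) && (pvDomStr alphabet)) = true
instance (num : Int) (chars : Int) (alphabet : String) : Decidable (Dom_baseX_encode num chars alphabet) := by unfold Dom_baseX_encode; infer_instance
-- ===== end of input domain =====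

-- B encodes by divide-and-conquer on the width (high half of the digits from num // base**lo,
-- low half from num, concatenated) instead of A's while loop threading a quotient through divmod
-- and reversing a digit list (objective: alternative).

-- ===== PORT A =====
-- the while loop: state = (num, chars, arr); appends alphabet[rem] each round
def pvALoop (num chars : Int) (ab : List Char) (arr : List Char) : List Char :=
  if 0 < chars then
    match PySem.Int.divmod? num (PySem.List.len ab) with
    | none => arr  -- ZeroDivisionError (empty alphabet); excluded by Pre_
    | some (q, r) => pvALoop q (chars - 1) ab (arr ++ [(PySem.List.pyGet? ab r).getD ' '])
  else arr
termination_by chars.toNat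
decreasing_by omega

def baseX_encode (num : Int) (chars : Int) (alphabet : String) : String :=
  String.mk ((pvALoop num chars alphabet.toList []).reverse)

-- ===== PORT B =====
-- enc(n, width): '' for width <= 0, one digit for width == 1, otherwise the two halves
-- concatenated.  base ** lo has lo > 0 here, so `^ lo.toNat` is exact for Python's `**`.
def pvEnc (ab : List Char) (n width : Int) : List Char :=
  if width ≤ 0 then []
  else if width = 1 then [(PySem.List.pyGet? ab (PySem.Int.mod n (PySem.List.len ab))).getD ' ']
  else
    let lo := PySem.Int.floordiv width 2
    pvEnc ab (PySem.Int.floordiv n ((PySem.List.len ab) ^ lo.toNat)) (width - lo) ++ pvEnc ab n lo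
termination_by width.toNat
decreasing_by
  · have h : PySem.Int.floordiv width 2 = width / 2 :=
      PySem.Int.floordiv_eq_ediv_of_pos (by omega)
    omega
  · have h : PySem.Int.floordiv width 2 = width / 2 :=
      PySem.Int.floordiv_eq_ediv_of_pos (by omega)
    omega

def baseX_encode_alt (num : Int) (chars : Int) (alphabet : String) : String :=
  String.mk (pvEnc alphabet.toList num chars)

-- ===== PRECONDITION & SPEC =====
-- Pre_ excludes exactly the inputs where A raises ZeroDivisionError: chars > 0 with an empty alphabet.
def Pre_baseX_encode (num : Int) (chars : Int) (alphabet : String) : Prop :=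
  chars ≤ 0 ∨ alphabet.toList ≠ []
instance (num : Int) (chars : Int) (alphabet : String) : Decidable (Pre_baseX_encode num chars alphabet) := by unfold Pre_baseX_encode; infer_instance
def pvWitness_baseX_encode : Int × Int × String := (61, 3, "0123456789")

def Spec_baseX_encode (num : Int) (chars : Int) (alphabet : String) (out : String) : Prop := out = baseX_encode_alt num chars alphabet
instance (num : Int) (chars : Int) (alphabet : String) (out : String) : Decidable (Spec_baseX_encode num chars alphabet out) := by unfold Spec_baseX_encode; infer_instance

-- ===== CLAIM (what is proved, stated in full; the proofs are below) =====
def Claim_equal_baseX_encode : Prop := ∀ (num : Int) (chars : Int) (alphabet : String), Dom_baseX_encode num chars alphabet → Pre_baseX_encode num chars alphabet → Spec_baseX_encode num chars alphabet (baseX_encode num chars alphabet)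

-- ===== LEMMAS AND PROOFS =====

-- digit k of num in base (len ab)
def pvDigit (ab : List Char) (num : Int) (k : Nat) : Char :=
  (PySem.List.pyGet? ab (PySem.Int.mod (PySem.Int.floordiv num ((PySem.List.len ab) ^ k)) (PySem.List.len ab))).getD ' '

lemma pvFloordiv_pow (num b : Int) (j k : Nat) (hb : 0 < b) :
    PySem.Int.floordiv (PySem.Int.floordiv num (b ^ j)) (b ^ k) = PySem.Int.floordiv num (b ^ (j + k)) := by
  rw [PySem.Int.floordiv_eq_ediv_of_pos (b := b ^ j) (by positivity),
      PySem.Int.floordiv_eq_ediv_of_pos (b := b ^ k) (by positivity),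
      PySem.Int.floordiv_eq_ediv_of_pos (b := b ^ (j + k)) (by positivity),
      Int.ediv_ediv_of_nonneg (by positivity), ← pow_add]

-- A's loop appends digits least-significant first
lemma pvALoop_eq (ab : List Char) (hb : ab ≠ []) :
    ∀ (n : Nat) (num : Int) (arr : List Char),
      pvALoop num (n : Int) ab arr = arr ++ (List.range n).map (pvDigit ab num) := by
  intro n
  induction n with
  | zero => intro num arr; rw [pvALoop]; simp
  | succ m ih =>
    intro num arr
    have hlen : (0 : Int) < PySem.List.len ab := by
      simp [PySem.List.len_eq]
      exact List.length_pos_iff.mpr hb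
    rw [pvALoop]
    have hpos : (0 : Int) < ((m : Int) + 1) := by omega
    simp only [Nat.cast_add, Nat.cast_one, if_pos hpos]
    have hdm : PySem.Int.divmod? num (PySem.List.len ab)
        = some (PySem.Int.floordiv num (PySem.List.len ab), PySem.Int.mod num (PySem.List.len ab)) := by
      simp [PySem.Int.divmod?, hb, PySem.Int.floordiv, PySem.Int.mod]
    rw [hdm]
    dsimp only
    have : ((m : Int) + 1 - 1) = (m : Int) := by omega
    rw [this, ih]
    rw [List.range_succ_eq_map, List.map_cons, List.map_map]
    have h0 : (PySem.List.pyGet? ab (PySem.Int.mod num (PySem.List.len ab))).getD ' '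
        = pvDigit ab num 0 := by
      simp [pvDigit, PySem.Int.floordiv, Int.fdiv_one]
    have hs : (List.range m).map (pvDigit ab (PySem.Int.floordiv num (PySem.List.len ab)))
        = (List.range m).map (pvDigit ab num ∘ Nat.succ) := by
      refine List.map_congr_left (fun k _ => ?_)
      simp only [Function.comp, pvDigit]
      have := pvFloordiv_pow num (PySem.List.len ab) 1 k hlen
      rw [pow_one, Nat.add_comm] at this
      rw [this]
    rw [h0, hs]
    simp

-- B's recursion produces the same digits, most-significant first
lemma pvEnc_eq (ab : List Char) (hb : ab ≠ []) :
    ∀ (w : Nat) (num : Int),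
      pvEnc ab num (w : Int) = ((List.range w).map (pvDigit ab num)).reverse := by
  intro w
  induction w using Nat.strong_induction_on with
  | _ w ih =>
    intro num
    have hlen : (0 : Int) < PySem.List.len ab := by
      simp [PySem.List.len_eq]
      exact List.length_pos_iff.mpr hb
    match w with
    | 0 => rw [pvEnc]; simp
    | 1 =>
      rw [pvEnc]
      norm_num [pvDigit, PySem.Int.floordiv, Int.fdiv_one]
    | (m + 2) =>
      rw [pvEnc]
      have h0 : ¬ ((m : Int) + 2 ≤ 0) := by omega
      have h1 : ¬ ((m : Int) + 2 = 1) := by omega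
      have hw : ((m + 2 : Nat) : Int) = (m : Int) + 2 := by push_cast; ring
      rw [hw]
      simp only [if_neg h0, if_neg h1]
      set L : Nat := (m + 2) / 2 with hL
      have hlo : PySem.Int.floordiv ((m : Int) + 2) 2 = (L : Int) := by
        have := PySem.Int.floordiv_eq_ediv_of_pos (a := (m : Int) + 2) (b := 2) (by omega)
        rw [this, hL]
        omega
      have hLle : L ≤ m + 2 := by omega
      have hLpos : 1 ≤ L := by omega
      have hsub : ((m : Int) + 2 - (L : Int)) = ((m + 2 - L : Nat) : Int) := by
        push_cast [Nat.cast_sub hLle]; ring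
      rw [hlo, hsub]
      simp only [Int.toNat_natCast]
      rw [ih (m + 2 - L) (by omega), ih L (by omega)]
      -- split range (m+2) = range L ++ shifted range (m+2-L)
      have hrange : List.range (m + 2) = List.range L ++ (List.range (m + 2 - L)).map (fun x => L + x) :=
        calc List.range (m + 2) = List.range (L + (m + 2 - L)) := by congr 1; omega
          _ = _ := List.range_add
      rw [hrange, List.map_append, List.reverse_append, List.map_map]
      congr 1
      refine congrArg List.reverse (List.map_congr_left (fun k _ => ?_))
      simp only [Function.comp, pvDigit]
      rw [pvFloordiv_pow num (PySem.List.len ab) L k hlen]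

theorem baseX_encode_spec : Claim_equal_baseX_encode := by
  intro num chars alphabet _hdom hpre
  unfold Spec_baseX_encode baseX_encode baseX_encode_alt
  by_cases hc : 0 < chars
  · rcases hpre with hpre | hab
    · omega
    · have hchars : ((chars.toNat : Nat) : Int) = chars := Int.toNat_of_nonneg (le_of_lt hc)
      rw [← hchars, pvALoop_eq alphabet.toList hab chars.toNat num [],
          pvEnc_eq alphabet.toList hab chars.toNat num]
      simp
  · rw [pvALoop, pvEnc]
    rw [if_neg hc, if_pos (by omega : chars ≤ 0)]
    simp
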